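-- pv_equiv track=rewrite | github.com/atomic01/AdventOfCode | AdventOfCode2018/AoC2018/Day_2/Puzzle_3/main3.py | check_two_letters
-- ===== SOURCE A (Python) =====
-- def check_two_letters(box_string):
--     letter_counter = 0
--     for letter in box_string:
--         letter_counter = box_string.count(letter)
--         if letter_counter == 2:
--             return 1
--
--     if letter_counter != 2:
--         return 0
-- ===== SOURCE B (Python) =====
-- def check_two_letters(box_string):
--     # Sort the characters, then one pass over runs of equal letters:
--     # return 1 as soon as a run of length exactly 2 ends.
--     prev = None
--     run = 0
--     for ch in sorted(box_string):
--         if ch == prev: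
--             run += 1
--         else:
--             if run == 2:
--                 return 1
--             prev, run = ch, 1
--     return 1 if run == 2 else 0
-- ===== Notes on version B (the rewrite author's own statement) =====
-- stated objective: faster
-- what changed: Replaces the per-letter whole-string .count() rescan with sort-then-single-pass run-length grouping over the sorted characters.
import Mathlib
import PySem

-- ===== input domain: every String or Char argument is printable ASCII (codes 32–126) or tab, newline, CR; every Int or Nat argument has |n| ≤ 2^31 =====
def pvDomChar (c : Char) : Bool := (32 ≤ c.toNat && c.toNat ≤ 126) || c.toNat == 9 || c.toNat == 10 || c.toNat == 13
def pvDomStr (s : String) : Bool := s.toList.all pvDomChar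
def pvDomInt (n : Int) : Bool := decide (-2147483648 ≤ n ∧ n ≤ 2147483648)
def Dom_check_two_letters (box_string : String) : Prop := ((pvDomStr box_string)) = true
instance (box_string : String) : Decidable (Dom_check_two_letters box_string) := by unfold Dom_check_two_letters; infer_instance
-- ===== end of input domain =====

-- B replaces A's per-letter whole-string count() rescan by a sort followed by one
-- run-length pass over the sorted characters (objective: faster on long strings).

-- ===== PORT A =====
-- 'box_string.count(letter)' on a single character is exactly the character count,
-- ported as PySem.List.count on the code points.
def checkTwoGoA (all : List Char) : List Char → Int → Int
  | [], letter_counter =>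
      -- after the loop: 'if letter_counter != 2: return 0'; the else branch
      -- (Python falling off with None) is unreachable since counter = 2 returns 1 in-loop
      if letter_counter ≠ 2 then 0 else 0
  | letter :: rest, _ =>
      let letter_counter : Int := (PySem.List.count all letter : Int)
      if letter_counter = 2 then 1 else checkTwoGoA all rest letter_counter

def check_two_letters (box_string : String) : Int :=
  checkTwoGoA box_string.toList box_string.toList 0

-- ===== PORT B =====
def checkTwoGoB : Option Char → Int → List Char → Int
  | _, run, [] => if run = 2 then 1 else 0
  | prev, run, ch :: rest =>
      if some ch = prev then checkTwoGoB prev (run + 1) rest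
      else if run = 2 then 1
      else checkTwoGoB (some ch) 1 rest

def check_two_letters_alt (box_string : String) : Int :=
  checkTwoGoB none 0 (PySem.List.sorted box_string.toList (fun c => c) false)

-- ===== PRECONDITION & SPEC =====
def Spec_check_two_letters (box_string : String) (out : Int) : Prop := out = check_two_letters_alt box_string
instance (box_string : String) (out : Int) : Decidable (Spec_check_two_letters box_string out) := by unfold Spec_check_two_letters; infer_instance

-- ===== CLAIM (what is proved, stated in full; the proofs are below) =====
def Claim_equal_check_two_letters : Prop := ∀ (box_string : String), Dom_check_two_letters box_string → Spec_check_two_letters box_string (check_two_letters box_string)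

-- ===== LEMMAS AND PROOFS =====

lemma goA_eq (all : List Char) (rest : List Char) (counter : Int) (h : counter ≠ 2) :
    checkTwoGoA all rest counter =
      if ∃ c ∈ rest, all.count c = 2 then 1 else 0 := by
  induction rest generalizing counter with
  | nil => simp [checkTwoGoA, h]
  | cons letter rest ih =>
      simp only [checkTwoGoA, PySem.List.count_eq]
      by_cases h2 : (all.count letter : Int) = 2
      · have : all.count letter = 2 := by exact_mod_cast h2
        simp [this]
      · have hn : all.count letter ≠ 2 := by
          intro hc; exact h2 (by exact_mod_cast hc)
        rw [if_neg h2, ih _ h2]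
        have hiff : (∃ c ∈ rest, all.count c = 2) ↔ ∃ c ∈ letter :: rest, all.count c = 2 := by
          constructor
          · rintro ⟨c, hc, hcnt⟩; exact ⟨c, List.mem_cons_of_mem _ hc, hcnt⟩
          · rintro ⟨c, hc, hcnt⟩
            rcases List.mem_cons.mp hc with rfl | hc
            · exact absurd hcnt hn
            · exact ⟨c, hc, hcnt⟩
        rw [if_congr hiff rfl rfl]

lemma goB_eq (prev : Char) (run : Int) (rest : List Char)
    (hs : (prev :: rest).Pairwise (· ≤ ·)) :
    checkTwoGoB (some prev) run rest =
      if run + (rest.count prev : Int) = 2 ∨ ∃ c ∈ rest, c ≠ prev ∧ rest.count c = 2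
      then 1 else 0 := by
  induction rest generalizing prev run with
  | nil => simp [checkTwoGoB]
  | cons ch t ih =>
      rcases List.pairwise_cons.mp hs with ⟨hle, hst⟩
      by_cases hc : ch = prev
      · subst hc
        have h1 : checkTwoGoB (some ch) run (ch :: t) = checkTwoGoB (some ch) (run + 1) t := by
          simp [checkTwoGoB]
        rw [h1, ih ch (run + 1) hst]
        have hcnt : ((ch :: t).count ch : Int) = (t.count ch : Int) + 1 := by
          simp
        have hiff : (run + 1 + (t.count ch : Int) = 2 ∨ ∃ c ∈ t, c ≠ ch ∧ t.count c = 2)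
            ↔ (run + ((ch :: t).count ch : Int) = 2 ∨
                ∃ c ∈ ch :: t, c ≠ ch ∧ (ch :: t).count c = 2) := by
          constructor
          · rintro (hsum | ⟨c, hc', hne, hcc⟩)
            · left; rw [hcnt]; omega
            · right; exact ⟨c, List.mem_cons_of_mem _ hc', hne,
                by rwa [List.count_cons_of_ne (Ne.symm hne)]⟩
          · rintro (hsum | ⟨c, hc', hne, hcc⟩)
            · left; rw [hcnt] at hsum; omega
            · rcases List.mem_cons.mp hc' with rfl | hmem
              · exact absurd rfl hne
              · right; exact ⟨c, hmem, hne,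
                  by rwa [List.count_cons_of_ne (Ne.symm hne)] at hcc⟩
        rw [if_congr hiff rfl rfl]
      · -- ch ≠ prev; sortedness gives prev ∉ ch :: t
        have hnotin : prev ∉ ch :: t := by
          intro hmem
          rcases List.mem_cons.mp hmem with rfl | hmem
          · exact hc rfl
          · have h1 : prev ≤ ch := hle ch (List.mem_cons_self)
            have h2 : ch ≤ prev := (List.pairwise_cons.mp hst).1 prev hmem
            exact hc (le_antisymm h2 h1)
        have hcnt0 : (ch :: t).count prev = 0 := List.count_eq_zero.mpr hnotin
        by_cases hr : run = 2
        · have hstep : checkTwoGoB (some prev) run (ch :: t) = 1 := by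
            simp [checkTwoGoB, hc, hr]
          rw [hstep]
          have hcond : run + ((ch :: t).count prev : Int) = 2 := by rw [hcnt0]; simpa using hr
          simp [hcond]
        · have h1 : checkTwoGoB (some prev) run (ch :: t) = checkTwoGoB (some ch) 1 t := by
            simp [checkTwoGoB, hc, hr]
          rw [h1, ih ch 1 hst]
          have hsum : run + ((ch :: t).count prev : Int) ≠ 2 := by
            rw [hcnt0]; simpa using hr
          have hchcnt : ((ch :: t).count ch : Int) = (t.count ch : Int) + 1 := by
            simp
          have hiff : (1 + (t.count ch : Int) = 2 ∨ ∃ c ∈ t, c ≠ ch ∧ t.count c = 2)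
              ↔ (run + ((ch :: t).count prev : Int) = 2 ∨
                  ∃ c ∈ ch :: t, c ≠ prev ∧ (ch :: t).count c = 2) := by
            constructor
            · rintro (hsum1 | ⟨c, hc', hne, hcc⟩)
              · right
                refine ⟨ch, List.mem_cons_self, hc, ?_⟩
                have : ((ch :: t).count ch : Int) = 2 := by rw [hchcnt]; omega
                exact_mod_cast this
              · right
                have hnp : c ≠ prev := by
                  intro h; subst h; exact hnotin (List.mem_cons_of_mem _ hc')
                exact ⟨c, List.mem_cons_of_mem _ hc', hnp,
                  by rwa [List.count_cons_of_ne (Ne.symm hne)]⟩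
            · rintro (hsum1 | ⟨c, hc', hne, hcc⟩)
              · exact absurd hsum1 hsum
              · rcases List.mem_cons.mp hc' with rfl | hmem
                · left
                  have : ((c :: t).count c : Int) = 2 := by exact_mod_cast hcc
                  rw [hchcnt] at this; omega
                · by_cases hcc' : c = ch
                  · subst hcc'
                    left
                    have : ((c :: t).count c : Int) = 2 := by exact_mod_cast hcc
                    rw [hchcnt] at this; omega
                  · right
                    exact ⟨c, hmem, hcc',
                      by rwa [List.count_cons_of_ne (Ne.symm hcc')] at hcc⟩
          rw [if_congr hiff rfl rfl]

lemma alt_eq (l : List Char) :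
    checkTwoGoB none 0 (PySem.List.sorted l (fun c => c) false) =
      if ∃ c ∈ l, l.count c = 2 then 1 else 0 := by
  have hperm : (PySem.List.sorted l (fun c => c) false).Perm l := PySem.List.sorted_perm l _ _
  have hpw : (PySem.List.sorted l (fun c => c) false).Pairwise (· ≤ ·) := by
    simpa using PySem.List.sorted_pairwise l (fun c => c)
  have hiff : (∃ c ∈ PySem.List.sorted l (fun c => c) false,
      (PySem.List.sorted l (fun c => c) false).count c = 2) ↔ ∃ c ∈ l, l.count c = 2 := by
    constructor
    · rintro ⟨c, hm, hc⟩; exact ⟨c, hperm.mem_iff.mp hm, by rwa [hperm.count_eq] at hc⟩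
    · rintro ⟨c, hm, hc⟩; exact ⟨c, hperm.mem_iff.mpr hm, by rwa [hperm.count_eq]⟩
  rw [if_congr hiff.symm rfl rfl]
  cases hcase : PySem.List.sorted l (fun c => c) false with
  | nil => simp [checkTwoGoB]
  | cons c t =>
      have h1 : checkTwoGoB none 0 (c :: t) = checkTwoGoB (some c) 1 t := by
        simp [checkTwoGoB]
      rw [hcase] at hpw
      rw [h1, goB_eq c 1 t hpw]
      have hccnt : ((c :: t).count c : Int) = (t.count c : Int) + 1 := by
        simp
      have hiff2 : (1 + (t.count c : Int) = 2 ∨ ∃ c' ∈ t, c' ≠ c ∧ t.count c' = 2)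
          ↔ ∃ c' ∈ c :: t, (c :: t).count c' = 2 := by
        constructor
        · rintro (hsum | ⟨c', hc', hne, hcc⟩)
          · refine ⟨c, List.mem_cons_self, ?_⟩
            have : ((c :: t).count c : Int) = 2 := by rw [hccnt]; omega
            exact_mod_cast this
          · exact ⟨c', List.mem_cons_of_mem _ hc',
              by rwa [List.count_cons_of_ne (Ne.symm hne)]⟩
        · rintro ⟨c', hm, hcc⟩
          by_cases hne : c' = c
          · subst hne
            left
            have : ((c' :: t).count c' : Int) = 2 := by exact_mod_cast hcc
            rw [hccnt] at this; omega
          · right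
            rcases List.mem_cons.mp hm with rfl | hmem
            · exact absurd rfl hne
            · exact ⟨c', hmem, hne,
                by rwa [List.count_cons_of_ne (Ne.symm hne)] at hcc⟩
      rw [if_congr hiff2 rfl rfl]

-- ===== VERDICT (by name: the statement is the Claim_ definition above) =====
theorem check_two_letters_spec : Claim_equal_check_two_letters := by
  intro box_string _
  unfold Spec_check_two_letters check_two_letters check_two_letters_alt
  rw [goA_eq _ _ 0 (by decide), alt_eq]
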